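-- pv_equiv track=rewrite | github.com/gfleetwood/youtube-channel-playlist-agent | functions.py | _parse
-- ===== SOURCE A (Python) =====
-- def _parse(output):
--     records = []
--     for block in output.split('\n\n'):
--         record = {}
--         last_key = None
--         for line in block.split('\n'):
--             if line.startswith('+ '):
--                 if last_key:
--                     record[last_key] += '\n' + line[2:]
--             elif ':' in line:
--                 k, v = line.split(':', 1)
--                 last_key = k.strip()
--                 record[last_key] = v.strip()
--         if record:
--             records.append(record)
--     return records
-- ===== SOURCE B (Python) =====
-- def _parse(output):
--     records = []
--     for block in output.split('\n\n'):
--         # cursor-based greedy parser: consume one field line, then greedily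
--         # consume its continuation region up to the next field line
--         lines = block.split('\n')
--         n = len(lines)
--         record = {}
--         i = 0
--         while i < n:
--             line = lines[i]
--             i += 1
--             if ':' in line and not line.startswith('+ '):
--                 k, v = line.split(':', 1)
--                 key = k.strip()
--                 parts = [v.strip()]
--                 while i < n and not (':' in lines[i] and not lines[i].startswith('+ ')):
--                     if lines[i].startswith('+ ') and key:
--                         parts.append(lines[i][2:])
--                     i += 1
--                 record[key] = '\n'.join(parts)
--         if record:
--             records.append(record)
--     return records
-- ===== Notes on version B (the rewrite author's own statement) =====
-- stated objective: alternative
-- what changed: A's flat per-line fold with a mutable dict and a last_key register is replaced by a cursor-based greedy parser: an outer loop that consumes one field line at a time and an inner loop that greedily consumes that field's whole continuation region before the next field line; no cross-line key state survives between groups.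
import Mathlib
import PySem

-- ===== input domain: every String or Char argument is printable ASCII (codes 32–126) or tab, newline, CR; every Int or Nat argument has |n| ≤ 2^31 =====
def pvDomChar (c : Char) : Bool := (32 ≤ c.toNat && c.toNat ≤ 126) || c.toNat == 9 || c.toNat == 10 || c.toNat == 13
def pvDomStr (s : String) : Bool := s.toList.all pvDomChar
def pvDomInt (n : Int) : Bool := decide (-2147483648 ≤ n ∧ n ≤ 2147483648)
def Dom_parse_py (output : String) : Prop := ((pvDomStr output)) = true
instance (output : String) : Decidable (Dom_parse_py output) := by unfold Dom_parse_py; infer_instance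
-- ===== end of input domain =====

-- B replaces A's flat per-line fold (mutable dict + last_key register) by a cursor-based
-- greedy parser (consume a field line, then its whole continuation region); objective:
-- alternative decomposition, same cost. Equivalence of return values is proved on all inputs.

-- ===== PORT A =====
-- one line of A's inner loop: state = (record dict, last_key as Option; Python's '' is falsy)
def pvAStep (st : PySem.Dict String String × Option String) (line : String) :
    PySem.Dict String String × Option String :=
  if PySem.Str.startswith line "+ " then
    match st.2 with
    | some k =>
      -- 'if last_key:' — None and '' are both falsy
      if k ≠ "" then
        -- record[last_key] += '\n' + line[2:]  (key always present here, so modify is exact)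
        (st.1.modify k "" (fun v => v ++ "\n" ++ PySem.Str.slice line (some 2) none), st.2)
      else st
    | none => st
  else if PySem.Str.isIn ":" line then
    match (PySem.Str.splitMax? line ":" 1).getD [] with
    | k :: v :: _ =>
      let lk := PySem.Str.strip k
      (st.1.insert lk (PySem.Str.strip v), some lk)
    | _ => st  -- unreachable: ':' in line guarantees two pieces
  else st

-- A's inner loop over one block's lines
def pvAState (block : String) : PySem.Dict String String × Option String :=
  ((PySem.Str.split? block "\n").getD []).foldl pvAStep (PySem.Dict.empty, none)

-- one block of A's outer loop
def pvABlock (records : List (List (String × String))) (block : String) :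
    List (List (String × String)) :=
  if (pvAState block).1.size ≠ 0 then records ++ [(pvAState block).1.items] else records

def parse_py (output : String) : List (List (String × String)) :=
  ((PySem.Str.split? output "\n\n").getD []).foldl pvABlock []

-- ===== PORT B =====
-- ':' in line and not line.startswith('+ ') — a field (key) line
def pvIsKey (line : String) : Bool :=
  PySem.Str.isIn ":" line && !(PySem.Str.startswith line "+ ")

-- B's inner while loop: advance the cursor past the continuation region of `key`
-- (everything up to the next field line), collecting the '+ ' payloads; the cursor walk
-- over lines[i:] is transcribed as structural recursion on the remaining-lines suffix
def pvConsume (key : String) : List String → List String × List String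
  | [] => ([], [])
  | l :: rest =>
    if pvIsKey l then ([], l :: rest)
    else
      let cr := pvConsume key rest
      if PySem.Str.startswith l "+ " && key ≠ "" then
        (PySem.Str.slice l (some 2) none :: cr.1, cr.2)
      else cr

theorem pvConsume_len (key : String) : ∀ (lines : List String),
    (pvConsume key lines).2.length ≤ lines.length := by
  intro lines
  induction lines with
  | nil => simp [pvConsume]
  | cons l rest ih =>
    rw [pvConsume]
    by_cases h : pvIsKey l = true
    · simp [h]
    · simp only [h]
      split
      · simp
      · split <;> simp <;> omega

-- B's outer while loop over the cursor, as structural recursion on the suffix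
def pvBFields (record : PySem.Dict String String) : List String → PySem.Dict String String
  | [] => record
  | line :: rest =>
    if pvIsKey line then
      match (PySem.Str.splitMax? line ":" 1).getD [] with
      | k :: v :: _ =>
        let key := PySem.Str.strip k
        let cr := pvConsume key rest
        pvBFields (record.insert key (PySem.Str.join "\n" (PySem.Str.strip v :: cr.1))) cr.2
      | _ => pvBFields record rest  -- unreachable: ':' in line guarantees two pieces
    else pvBFields record rest
termination_by lines => lines.length
decreasing_by
  · have := pvConsume_len (PySem.Str.strip k) rest; simp; omega
  · simp
  · simp

-- B's record for one block
def pvBRecord (block : String) : PySem.Dict String String :=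
  pvBFields PySem.Dict.empty ((PySem.Str.split? block "\n").getD [])

-- one block of B
def pvBBlock (records : List (List (String × String))) (block : String) :
    List (List (String × String)) :=
  if (pvBRecord block).size ≠ 0 then records ++ [(pvBRecord block).items] else records

def parse_py_alt (output : String) : List (List (String × String)) :=
  ((PySem.Str.split? output "\n\n").getD []).foldl pvBBlock []

-- ===== PRECONDITION & SPEC =====
def Spec_parse_py (output : String) (out : List (List (String × String))) : Prop := out = parse_py_alt output
instance (output : String) (out : List (List (String × String))) : Decidable (Spec_parse_py output out) := by unfold Spec_parse_py; infer_instance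

-- ===== CLAIM (what is proved, stated in full; the proofs are below) =====
def Claim_equal_parse_py : Prop := ∀ (output : String), Dom_parse_py output → Spec_parse_py output (parse_py output)

-- ===== LEMMAS AND PROOFS =====

theorem pv_insert_insert_self {κ ν : Type} [BEq κ] [LawfulBEq κ] (d : PySem.Dict κ ν)
    (k : κ) (v w : ν) : (d.insert k v).insert k w = d.insert k w := by
  apply PySem.Dict.ext
  by_cases h : d.contains k = true
  · simp [PySem.Dict.items_insert, h, List.map_map, Function.comp]
    intro a b hab
    by_cases hak : a = k <;> simp [hak]
  · have hk : ∀ p ∈ d.items, p.1 ≠ k := by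
      intro p hp hpk
      have : k ∈ d.keys := by
        simp only [PySem.Dict.keys]
        exact List.mem_map.2 ⟨p, hp, hpk⟩
      rw [← PySem.Dict.contains_iff_mem_keys] at this
      simp [h] at this
    simp [PySem.Dict.items_insert, h]
    have := List.map_congr_left (l := d.items)
      (f := fun p => if (p.1 == k) = true then (k, w) else p) (g := id)
      (fun p hp => by simp [hk p hp])
    simpa using this

theorem pv_ic_cons_cons (sep x y : List Char) (u : List (List Char)) :
    sep.intercalate (x :: y :: u) = x ++ sep ++ sep.intercalate (y :: u) := by
  simp [List.intercalate]

theorem pv_ic_concat (sep a : List Char) : ∀ (l : List (List Char)), l ≠ [] →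
    sep.intercalate (l ++ [a]) = sep.intercalate l ++ sep ++ a := by
  intro l
  induction l with
  | nil => intro h; exact absurd rfl h
  | cons x t ih =>
    intro _
    cases t with
    | nil => simp [List.intercalate, List.intersperse]
    | cons y u =>
      have h' := ih (by simp)
      simp only [List.cons_append] at h' ⊢
      rw [pv_ic_cons_cons, pv_ic_cons_cons, h']
      simp

theorem pv_join_singleton (v : String) : PySem.Str.join "\n" [v] = v := by
  apply String.toList_inj.mp
  simp [PySem.Str.toList_join, PySem.Chars.join, List.intercalate]

theorem pv_join_concat (ps : List String) (h : ps ≠ []) (c : String) :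
    PySem.Str.join "\n" (ps ++ [c]) = PySem.Str.join "\n" ps ++ "\n" ++ c := by
  apply String.toList_inj.mp
  simp only [String.toList_append, PySem.Str.toList_join, List.map_append, List.map_cons,
    List.map_nil]
  rw [show PySem.Chars.join = List.intercalate from rfl]
  rw [pv_ic_concat _ _ _ (by simpa using h)]

-- a non-field line that does not start with '+ ' has no ':' in it
theorem pv_notkey_isIn (l : String) (hk : pvIsKey l = false)
    (hsw : PySem.Str.startswith l "+ " = false) : PySem.Str.isIn ":" l = false := by
  unfold pvIsKey at hk
  rw [hsw, Bool.not_false, Bool.and_true] at hk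
  exact hk

-- splitOnMax.go in the m = 0 state returns immediately with one more piece
theorem pv_go_zero (fuel : Nat) (l cur : List Char) (acc : List (List Char)) :
    (PySem.Chars.splitOnMax.go [':'] fuel 0 l cur acc).length = acc.length + 1 := by
  cases fuel with
  | zero => simp [PySem.Chars.splitOnMax.go]
  | succ f => cases l with
    | nil => simp [PySem.Chars.splitOnMax.go]
    | cons c rest => simp [PySem.Chars.splitOnMax.go]

-- with maxsplit 1 and ':' present, exactly one split happens: two pieces
theorem pv_go_one : ∀ (fuel : Nat) (l : List Char), l.length < fuel → (':' ∈ l) →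
    ∀ (cur : List Char) (acc : List (List Char)),
    (PySem.Chars.splitOnMax.go [':'] fuel 1 l cur acc).length = acc.length + 2 := by
  intro fuel
  induction fuel with
  | zero => intro l hl; omega
  | succ f ih =>
    intro l hl hm cur acc
    cases l with
    | nil => simp at hm
    | cons c rest =>
      by_cases hc : c = ':'
      · have hpre : [':'].isPrefixOf (c :: rest) = true := by simp [hc, List.isPrefixOf]
        simp only [PySem.Chars.splitOnMax.go, hpre, if_true]
        norm_num [pv_go_zero]
      · have hpre : [':'].isPrefixOf (c :: rest) = false := by
          simp [List.isPrefixOf]; exact fun h => hc h.symm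
        have hm' : ':' ∈ rest := by
          rcases List.mem_cons.1 hm with h | h
          · exact absurd h.symm hc
          · exact h
        simp only [PySem.Chars.splitOnMax.go, hpre]
        norm_num
        exact ih rest (by simp at hl; omega) hm' (c :: cur) acc

-- ':' in line ⇒ line.split(':', 1) has the shape k :: v :: rest
theorem pv_split_two (line : String) (h : PySem.Str.isIn ":" line = true) :
    ∃ k v rest, (PySem.Str.splitMax? line ":" 1).getD [] = k :: v :: rest := by
  have hmem : ':' ∈ line.toList := by
    have h' : PySem.Chars.isIn [':'] line.toList = true := by simpa using h
    rcases (PySem.Chars.isIn_iff_infix _ _).mp h' with ⟨p, s, hp⟩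
    rw [← hp]; simp
  have hlen : (PySem.Chars.splitOnMax line.toList [':'] 1).length = 2 := by
    unfold PySem.Chars.splitOnMax
    norm_num
    have := pv_go_one (line.toList.length + 1) line.toList (by omega) hmem [] []
    simpa using this
  rcases e : PySem.Chars.splitOnMax line.toList [':'] 1 with _ | ⟨a, _ | ⟨b, r⟩⟩
  · rw [e] at hlen; simp at hlen
  · rw [e] at hlen; simp at hlen
  · refine ⟨String.ofList a, String.ofList b, r.map String.ofList, ?_⟩
    simp [PySem.Str.splitMax?, PySem.Chars.splitMax?, e]

-- A's fold over a continuation region: appends exactly B's collected payloads to the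
-- current key's value and stops (state-wise) at pvConsume's rest
theorem pv_consume_eq (key : String) : ∀ (lines : List String)
    (d : PySem.Dict String String) (parts : List String), parts ≠ [] →
    lines.foldl pvAStep (d.insert key (PySem.Str.join "\n" parts), some key)
      = (pvConsume key lines).2.foldl pvAStep
          (d.insert key (PySem.Str.join "\n" (parts ++ (pvConsume key lines).1)), some key) := by
  intro lines
  induction lines with
  | nil => intro d parts _; simp [pvConsume]
  | cons l rest ih =>
    intro d parts hp
    by_cases hk : pvIsKey l = true
    · rw [pvConsume]; simp [hk]
    · have hkf : pvIsKey l = false := by simp [hk]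
      by_cases hsw : PySem.Str.startswith l "+ " = true
      · by_cases hke : key = ""
        · -- falsy key: A skips, B collects nothing
          subst hke
          have hA : pvAStep (d.insert "" (PySem.Str.join "\n" parts), some "") l
              = (d.insert "" (PySem.Str.join "\n" parts), some "") := by
            simp only [pvAStep, hsw]; simp
          have hC : pvConsume "" (l :: rest) = pvConsume "" rest := by
            rw [pvConsume]; simp [hkf]
          rw [List.foldl_cons, hA, hC]
          exact ih d parts hp
        · -- append the payload to the last key's value
          have hA : pvAStep (d.insert key (PySem.Str.join "\n" parts), some key) l
              = (d.insert key (PySem.Str.join "\n"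
                  (parts ++ [PySem.Str.slice l (some 2) none])), some key) := by
            simp only [pvAStep, hsw]
            simp [hke, PySem.Dict.modify, PySem.Dict.getD_insert_self,
              pv_insert_insert_self, pv_join_concat parts hp]
          have hC : pvConsume key (l :: rest)
              = (PySem.Str.slice l (some 2) none :: (pvConsume key rest).1,
                 (pvConsume key rest).2) := by
            have hswc : PySem.Chars.startswith l.toList ['+', ' '] = true := by simpa using hsw
            rw [pvConsume]; simp only [hkf]; simp [hswc, hke]
          rw [List.foldl_cons, hA, hC]
          have := ih d (parts ++ [PySem.Str.slice l (some 2) none]) (by simp)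
          simpa [List.append_assoc] using this
      · -- neither '+ ' nor a key line: ':' cannot be in it; A and B both skip
        have hswf : PySem.Str.startswith l "+ " = false := by simpa using hsw
        have hin : PySem.Str.isIn ":" l = false := pv_notkey_isIn l hkf hswf
        have hA : pvAStep (d.insert key (PySem.Str.join "\n" parts), some key) l
            = (d.insert key (PySem.Str.join "\n" parts), some key) := by
          simp only [pvAStep, hswf, hin]; simp
        have hC : pvConsume key (l :: rest) = pvConsume key rest := by
          have hswc : PySem.Chars.startswith l.toList ['+', ' '] = false := by simpa using hswf
          rw [pvConsume]; simp only [hkf]; simp [hswc]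
        rw [List.foldl_cons, hA, hC]
        exact ih d parts hp

-- pvConsume's rest begins with a key line (or is empty)
theorem pv_consume_rest_key (key : String) : ∀ (lines : List String) (l : String)
    (ls : List String), (pvConsume key lines).2 = l :: ls → pvIsKey l = true := by
  intro lines
  induction lines with
  | nil => intro l ls h; simp [pvConsume] at h
  | cons x rest ih =>
    intro l ls h
    by_cases hk : pvIsKey x = true
    · rw [pvConsume] at h; simp [hk] at h
      rw [← h.1]; exact hk
    · have hkf : pvIsKey x = false := by simpa using hk
      rw [pvConsume] at h
      simp only [hkf, Bool.false_eq_true, if_false] at h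
      split at h <;> exact ih l ls (by simpa using h)

-- the main invariant: A's per-line fold computes B's greedy-parser record, provided the
-- fold starts with a falsy last_key or at a key line (which resets last_key anyway)
theorem pv_main : ∀ (n : Nat) (lines : List String), lines.length ≤ n →
    ∀ (d : PySem.Dict String String) (lk : Option String),
    (lk = none ∨ lk = some "" ∨ (∀ l ls, lines = l :: ls → pvIsKey l = true)) →
    (lines.foldl pvAStep (d, lk)).1 = pvBFields d lines := by
  intro n
  induction n with
  | zero =>
    intro lines hl d lk _
    have : lines = [] := List.eq_nil_of_length_eq_zero (by omega)
    subst this; simp [pvBFields]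
  | succ m ih =>
    intro lines hl d lk hH
    cases lines with
    | nil => simp [pvBFields]
    | cons line rest =>
      by_cases hk : pvIsKey line = true
      · -- a field line: A inserts the stripped value and sets last_key
        have hin : PySem.Str.isIn ":" line = true := by
          unfold pvIsKey at hk
          exact (Bool.and_eq_true_iff.mp hk).1
        have hsw : PySem.Str.startswith line "+ " = false := by
          unfold pvIsKey at hk
          have := (Bool.and_eq_true_iff.mp hk).2
          simpa using this
        rcases pv_split_two line hin with ⟨k, v, rest2, hsplit⟩
        have hA : pvAStep (d, lk) line
            = (d.insert (PySem.Str.strip k) (PySem.Str.strip v), some (PySem.Str.strip k)) := by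
          simp only [pvAStep, hsw, hin, hsplit]; simp
        have hB : pvBFields d (line :: rest)
            = pvBFields (d.insert (PySem.Str.strip k)
                (PySem.Str.join "\n" (PySem.Str.strip v ::
                  (pvConsume (PySem.Str.strip k) rest).1)))
                (pvConsume (PySem.Str.strip k) rest).2 := by
          rw [pvBFields]
          simp only [hk, hsplit]
          simp
        rw [hB, List.foldl_cons, hA]
        have hcons := pv_consume_eq (PySem.Str.strip k) rest d [PySem.Str.strip v] (by simp)
        rw [show d.insert (PySem.Str.strip k) (PySem.Str.strip v)
              = d.insert (PySem.Str.strip k) (PySem.Str.join "\n" [PySem.Str.strip v]) by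
            rw [pv_join_singleton], hcons]
        simp only [List.singleton_append]
        have hlen : (pvConsume (PySem.Str.strip k) rest).2.length ≤ m := by
          have := pvConsume_len (PySem.Str.strip k) rest
          simp at hl; omega
        exact ih _ hlen _ (some (PySem.Str.strip k))
          (Or.inr (Or.inr (fun l ls h => pv_consume_rest_key _ rest l ls h)))
      · -- not a field line: with a falsy last_key A does nothing; B skips it
        have hkf : pvIsKey line = false := by simp [hk]
        have hlk : lk = none ∨ lk = some "" := by
          rcases hH with h | h | h
          · exact Or.inl h
          · exact Or.inr h
          · exact absurd (h line rest rfl) (by simp [hkf])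
        have hA : pvAStep (d, lk) line = (d, lk) := by
          by_cases hsw : PySem.Str.startswith line "+ " = true
          · rcases hlk with h | h <;> subst h <;> (simp only [pvAStep, hsw]; simp)
          · have hswf : PySem.Str.startswith line "+ " = false := by simpa using hsw
            have hin : PySem.Str.isIn ":" line = false := pv_notkey_isIn line hkf hswf
            simp only [pvAStep, hswf, hin]; simp
        have hB : pvBFields d (line :: rest) = pvBFields d rest := by
          rw [pvBFields]; simp [hkf]
        rw [hB, List.foldl_cons, hA]
        exact ih rest (by simp at hl; omega) d lk
          (by rcases hlk with h | h
              · exact Or.inl h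
              · exact Or.inr (Or.inl h))

theorem pv_block_eq (records : List (List (String × String))) (block : String) :
    pvABlock records block = pvBBlock records block := by
  unfold pvABlock pvBBlock
  have h : (pvAState block).1 = pvBRecord block := by
    unfold pvAState pvBRecord
    exact pv_main ((PySem.Str.split? block "\n").getD []).length _ le_rfl
      PySem.Dict.empty none (Or.inl rfl)
  rw [h]

-- ===== VERDICT (by name: the statement is the Claim_ definition above) =====
theorem parse_py_spec : Claim_equal_parse_py := by
  intro output _
  unfold Spec_parse_py parse_py parse_py_alt
  have : pvABlock = pvBBlock := by
    funext records block; exact pv_block_eq records block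
  rw [this]
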